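-- pv_equiv track=rewrite | github.com/FlowSight/coding | company wise/stripe/random source/extract_cards.py | filter_generic_cards
-- ===== SOURCE A (Python) =====
-- def filter_generic_cards(cards, supported_cards):
--     # Check if any system-supported card starts with the generic card
--     unique_cards = []
--     seen = set()
--
--     for card in cards:
--         if card in supported_cards:
--             unique_cards.append(card)
--             seen.add(card)
--         else:
--             for sup_card in supported_cards:
--                 if sup_card.startswith(card) and sup_card not in seen:
--                     unique_cards.append(sup_card)
--                     seen.add(sup_card)
--
--     return unique_cards
-- ===== SOURCE B (Python) =====
-- def filter_generic_cards(cards, supported_cards):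
--     # Prefix index built once: every prefix of every supported card -> the
--     # supported cards having that prefix, in original list order.
--     index = {}
--     for s in supported_cards:
--         for j in range(len(s) + 1):
--             p = s[:j]
--             index[p] = index.get(p, []) + [s]
--     sup_set = set(supported_cards)
--     unique_cards = []
--     seen = set()
--     for card in cards:
--         if card in sup_set:
--             unique_cards.append(card)
--             seen.add(card)
--         else:
--             for s in index.get(card, []):
--                 if s not in seen:
--                     unique_cards.append(s)
--                     seen.add(s)
--     return unique_cards
-- ===== Notes on version B (the rewrite author's own statement) =====
-- stated objective: faster
-- what changed: B builds a prefix index (dict mapping every prefix of every supported card to the matching supported cards) and a membership set once, so the per-card scan of supported_cards in A's inner loop disappears.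
import Mathlib
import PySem

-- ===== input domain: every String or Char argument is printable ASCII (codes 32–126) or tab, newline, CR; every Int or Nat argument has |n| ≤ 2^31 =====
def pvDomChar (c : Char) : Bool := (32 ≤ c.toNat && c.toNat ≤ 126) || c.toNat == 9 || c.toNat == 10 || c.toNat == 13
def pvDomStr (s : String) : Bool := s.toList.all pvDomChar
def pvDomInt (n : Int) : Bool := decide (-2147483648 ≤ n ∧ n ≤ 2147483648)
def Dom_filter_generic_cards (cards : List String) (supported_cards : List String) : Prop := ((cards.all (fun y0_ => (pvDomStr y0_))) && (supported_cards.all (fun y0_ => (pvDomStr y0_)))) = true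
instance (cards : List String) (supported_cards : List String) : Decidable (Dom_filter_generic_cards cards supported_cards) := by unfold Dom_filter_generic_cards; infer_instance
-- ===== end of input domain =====

-- B replaces A's per-card scan of supported_cards by a prefix index (dict from
-- every prefix of every supported card to the matching supported cards) built once.

-- ===== PORT A =====
def filter_generic_cards (cards : List String) (supported_cards : List String) : List String :=
  (cards.foldl
    (fun (st : List String × PySem.Set String) card =>
      if supported_cards.contains card then
        (st.1 ++ [card], PySem.Set.add st.2 card)
      else
        supported_cards.foldl
          (fun st sup_card =>
            if PySem.Str.startswith sup_card card && !(PySem.Set.contains st.2 sup_card) then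
              (st.1 ++ [sup_card], PySem.Set.add st.2 sup_card)
            else st) st)
    ([], PySem.Set.empty)).1

-- ===== PORT B =====
-- 'for j in range(len(s)+1): p = s[:j]; index[p] = index.get(p, []) + [s]'
def pvPrefixFold (s : String) (d : PySem.Dict String (List String)) : PySem.Dict String (List String) :=
  (PySem.List.pyRange 0 (PySem.Str.len s + 1) 1).foldl
    (fun d j => d.modify (PySem.Str.slice s none (some j)) [] (· ++ [s])) d

def pvBuildIndex (supported_cards : List String) : PySem.Dict String (List String) :=
  supported_cards.foldl (fun d s => pvPrefixFold s d) PySem.Dict.empty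

def filter_generic_cards_alt (cards : List String) (supported_cards : List String) : List String :=
  let index := pvBuildIndex supported_cards
  let sup_set := PySem.Set.ofList supported_cards
  (cards.foldl
    (fun (st : List String × PySem.Set String) card =>
      if PySem.Set.contains sup_set card then
        (st.1 ++ [card], PySem.Set.add st.2 card)
      else
        (index.getD card []).foldl
          (fun st s =>
            if !(PySem.Set.contains st.2 s) then
              (st.1 ++ [s], PySem.Set.add st.2 s)
            else st) st)
    ([], PySem.Set.empty)).1

-- ===== PRECONDITION & SPEC =====
def Spec_filter_generic_cards (cards : List String) (supported_cards : List String) (out : List String) : Prop := out = filter_generic_cards_alt cards supported_cards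
instance (cards : List String) (supported_cards : List String) (out : List String) : Decidable (Spec_filter_generic_cards cards supported_cards out) := by unfold Spec_filter_generic_cards; infer_instance

-- ===== CLAIM (what is proved, stated in full; the proofs are below) =====
def Claim_equal_filter_generic_cards : Prop := ∀ (cards : List String) (supported_cards : List String), Dom_filter_generic_cards cards supported_cards → Spec_filter_generic_cards cards supported_cards (filter_generic_cards cards supported_cards)

-- ===== LEMMAS AND PROOFS =====

-- a fold whose condition is 'p x && q st x' is the fold over the p-filtered list
theorem pv_foldl_and_filter {α β : Type} (p : α → Bool) (q : β → α → Bool) (f : β → α → β) :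
    ∀ (l : List α) (st : β),
      l.foldl (fun st x => if p x && q st x then f st x else st) st
        = (l.filter p).foldl (fun st x => if q st x then f st x else st) st := by
  intro l
  induction l with
  | nil => intro st; rfl
  | cons a t ih =>
    intro st
    rw [List.foldl_cons, List.filter_cons]
    cases hp : p a with
    | true =>
      rw [Bool.true_and, if_pos rfl, List.foldl_cons, ih]
    | false =>
      rw [Bool.false_and, if_neg (by simp), if_neg (by simp), ih]

-- a Nodup candidate list filtered by a predicate that holds exactly at j
theorem pv_filter_unique (j : Nat) (p : Nat → Bool) :
    ∀ (l : List Nat), l.Nodup → (∀ k ∈ l, p k = (k == j)) →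
      l.filter p = if j ∈ l then [j] else [] := by
  intro l
  induction l with
  | nil => simp
  | cons a t ih =>
    intro hnd h
    rcases List.nodup_cons.mp hnd with ⟨hat, hndt⟩
    have ha : p a = (a == j) := h a (by simp)
    rw [List.filter_cons]
    by_cases haj : a = j
    · subst haj
      have ht : t.filter p = [] := List.filter_eq_nil_iff.mpr (fun k hk => by
        have hk' := h k (List.mem_cons_of_mem _ hk)
        have hkj : k ≠ a := fun he => hat (he ▸ hk)
        simp [hk', hkj])
      simp [ha, ht]
    · have ha' : p a = false := by rw [ha]; simp [haj]
      rw [ih hndt (fun k hk => h k (List.mem_cons_of_mem _ hk))]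
      simp [ha', Ne.symm haj]

theorem pv_range_filter_take (cs c : List Char) :
    (List.range (cs.length + 1)).filter (fun k => cs.take k == c)
      = if c <+: cs then [c.length] else [] := by
  by_cases hpre : c <+: cs
  · have hlen : c.length ≤ cs.length := hpre.length_le
    rw [pv_filter_unique c.length _ _ (List.nodup_range) ?_]
    · simp [hpre, Nat.lt_succ_of_le hlen]
    · intro k hk
      have hk' : k ≤ cs.length := Nat.lt_succ_iff.mp (List.mem_range.mp hk)
      by_cases hkc : k = c.length
      · subst hkc
        simp [(List.prefix_iff_eq_take.mp hpre).symm]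
      · have hne : cs.take k ≠ c := fun he => hkc (by
          have : (cs.take k).length = k := by simp [Nat.min_eq_left hk']
          rw [← this, he])
        simp [hne, hkc]
  · rw [List.filter_eq_nil_iff.mpr, if_neg hpre]
    intro k hk
    simp only [beq_iff_eq]
    exact fun he => hpre (he ▸ List.take_prefix k cs)

-- String == compares the character lists
theorem pv_beq_toList (x y : String) : (x == y) = (x.toList == y.toList) := by
  by_cases h : x = y
  · simp [h]
  · have h' : x.toList ≠ y.toList := fun hl => h (String.toList_inj.mp hl)
    simp [h, h']

-- the prefix fold appends s at key 'card' exactly when s starts with card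
theorem pv_prefixFold_getD (s : String) (d : PySem.Dict String (List String)) (card : String) :
    (pvPrefixFold s d).getD card []
      = d.getD card [] ++ (if PySem.Str.startswith s card then [s] else []) := by
  unfold pvPrefixFold
  rw [show (PySem.List.pyRange 0 (PySem.Str.len s + 1) 1).foldl
        (fun d j => d.modify (PySem.Str.slice s none (some j)) [] (· ++ [s])) d
      = ((PySem.List.pyRange 0 (PySem.Str.len s + 1) 1).map
          (fun j => (PySem.Str.slice s none (some j), s))).foldl
          (fun d p => d.modify p.1 [] (· ++ [p.2])) d from
        (List.foldl_map (f := fun j : Int => (PySem.Str.slice s none (some j), s))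
          (g := fun (d : PySem.Dict String (List String)) (p : String × String) =>
            d.modify p.1 [] (· ++ [p.2]))).symm]
  rw [PySem.Dict.getD_foldl_modify_append]
  congr 1
  have hr : PySem.List.pyRange 0 (PySem.Str.len s + 1) 1
      = (List.range (s.toList.length + 1)).map (fun k : Nat => (k : Int)) := by
    rw [PySem.List.pyRange_one]; simp
  rw [hr, List.map_map, List.filter_map, List.map_map]
  rw [List.filter_congr (q := fun k : Nat => s.toList.take k == card.toList) ?_]
  · rw [pv_range_filter_take]
    by_cases hp : card.toList <+: s.toList
    · have hsw : PySem.Chars.startswith s.toList card.toList = true :=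
        (PySem.Chars.startswith_iff _ _).mpr hp
      simp [hp, hsw, Function.comp]
    · have hsw : PySem.Chars.startswith s.toList card.toList = false :=
        Bool.eq_false_iff.mpr (fun h => hp ((PySem.Chars.startswith_iff _ _).mp h))
      simp [hp, hsw]
  · intro k _
    simp only [Function.comp]
    rw [pv_beq_toList, PySem.Str.toList_slice]
    simp [PySem.List.slice_to_natCast]

theorem pv_buildFold_getD (l : List String) :
    ∀ (d : PySem.Dict String (List String)) (card : String),
      (l.foldl (fun d s => pvPrefixFold s d) d).getD card []
        = d.getD card [] ++ l.filter (fun s => PySem.Str.startswith s card) := by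
  induction l with
  | nil => intro d card; simp
  | cons a t ih =>
    intro d card
    rw [List.foldl_cons, ih, pv_prefixFold_getD, List.filter_cons, List.append_assoc]
    by_cases h : PySem.Str.startswith a card = true
    · rw [PySem.Str.startswith_eq] at h
      simp [h]
    · rw [PySem.Str.startswith_eq] at h
      simp [h]

theorem pv_buildIndex_getD (supported_cards : List String) (card : String) :
    (pvBuildIndex supported_cards).getD card []
      = supported_cards.filter (fun s => PySem.Str.startswith s card) := by
  unfold pvBuildIndex
  rw [pv_buildFold_getD]
  simp

-- ===== VERDICT (by name: the statement is the Claim_ definition above) =====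
theorem filter_generic_cards_spec : Claim_equal_filter_generic_cards := by
  intro cards supported_cards _
  unfold Spec_filter_generic_cards filter_generic_cards filter_generic_cards_alt
  dsimp only []
  have hstep : (fun (st : List String × PySem.Set String) card =>
      if supported_cards.contains card then (st.1 ++ [card], PySem.Set.add st.2 card)
      else supported_cards.foldl (fun st sup_card =>
        if PySem.Str.startswith sup_card card && !(PySem.Set.contains st.2 sup_card) then
          (st.1 ++ [sup_card], PySem.Set.add st.2 sup_card) else st) st)
    = (fun (st : List String × PySem.Set String) card =>
      if PySem.Set.contains (PySem.Set.ofList supported_cards) card then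
        (st.1 ++ [card], PySem.Set.add st.2 card)
      else ((pvBuildIndex supported_cards).getD card []).foldl (fun st s =>
        if !(PySem.Set.contains st.2 s) then (st.1 ++ [s], PySem.Set.add st.2 s) else st) st) := by
    funext st card
    have hmem : PySem.Set.contains (PySem.Set.ofList supported_cards) card
        = supported_cards.contains card := by
      by_cases h : card ∈ supported_cards
      · simp [PySem.Set.contains_eq_listContains, PySem.Set.mem_ofList, h]
      · simp [PySem.Set.contains_eq_listContains, PySem.Set.mem_ofList, h]
    rw [hmem, pv_buildIndex_getD,
      pv_foldl_and_filter (p := fun sup_card => PySem.Str.startswith sup_card card)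
        (q := fun (st : List String × PySem.Set String) x => !(PySem.Set.contains st.2 x))
        (f := fun st x => (st.1 ++ [x], PySem.Set.add st.2 x))]
  rw [hstep]
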